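-- pv_equiv track=rewrite | github.com/benthayer/NN-Sudoku-Solver | game_board.py | find_twins
-- ===== SOURCE A (Python) =====
-- def find_twins(values, unit):
--     """Returns all twins in the unit minus the twins that have already been cleared"""
--     twins = []
--     # find all of the twins
--     for i in range(len(unit)):
--         box1 = unit[i]
--         if len(values[box1]) == 2:
--             pair1 = values[box1]
--             for j in range(i + 1, len(unit)):
--                 box2 = unit[j]
--                 pair2 = values[box2]
--                 if pair2 == pair1:
--                     twins.append(pair2)
--     return twins
-- ===== SOURCE B (Python) =====
-- def find_twins(values, unit):
--     """Returns all twins in the unit minus the twins that have already been cleared"""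
--     # one pass to count each candidate string, one forward pass emitting
--     # (total - seen_so_far) copies for every 2-candidate box
--     total = {}
--     for box in unit:
--         v = values[box]
--         total[v] = total.get(v, 0) + 1
--     twins = []
--     seen = {}
--     for box in unit:
--         v = values[box]
--         c = seen.get(v, 0) + 1
--         seen[v] = c
--         if len(v) == 2:
--             twins.extend([v] * (total[v] - c))
--     return twins
-- ===== Notes on version B (the rewrite author's own statement) =====
-- stated objective: faster
-- what changed: Replaces the all-pairs nested scan with two linear passes: a counting dict built once, then a forward pass that emits (total - seen) copies per 2-candidate box, preserving the exact nested-loop output order.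
import Mathlib
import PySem

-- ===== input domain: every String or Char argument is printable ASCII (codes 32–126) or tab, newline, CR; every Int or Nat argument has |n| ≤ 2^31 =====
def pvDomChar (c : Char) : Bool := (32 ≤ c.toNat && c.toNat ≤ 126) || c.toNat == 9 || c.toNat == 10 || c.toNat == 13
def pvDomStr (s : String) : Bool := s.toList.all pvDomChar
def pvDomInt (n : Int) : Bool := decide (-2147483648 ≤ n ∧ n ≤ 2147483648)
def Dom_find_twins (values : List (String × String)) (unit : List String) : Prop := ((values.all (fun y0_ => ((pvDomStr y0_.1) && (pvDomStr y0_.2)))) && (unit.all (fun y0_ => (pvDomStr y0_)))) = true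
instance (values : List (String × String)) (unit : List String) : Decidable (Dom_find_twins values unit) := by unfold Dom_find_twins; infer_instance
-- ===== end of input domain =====

-- B replaces A's all-pairs nested scan with two linear passes (a counting dict, then a
-- forward pass emitting total-minus-seen copies per 2-candidate box); same output, same order.


-- shared primitive: values[box] (dict lookup; Pre_ guarantees the key is present, so getD "" is exact)
def pyAt (values : List (String × String)) (b : String) : String :=
  ((PySem.Dict.ofList values).get? b).getD ""

-- ===== PORT A =====
-- inner loop: 'for j in range(i+1, len(unit)): …' over the suffix after box1, same twins accumulator
def ftInner (values : List (String × String)) (pair1 : String) (rest : List String)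
    (twins : List String) : List String :=
  match rest with
  | [] => twins
  | box2 :: rs =>
      let pair2 := pyAt values box2
      ftInner values pair1 rs (if pair2 = pair1 then twins ++ [pair2] else twins)

-- outer loop: 'for i in range(len(unit)): box1 = unit[i] …'
def ftOuter (values : List (String × String)) (boxes : List String)
    (twins : List String) : List String :=
  match boxes with
  | [] => twins
  | box1 :: rest =>
      if PySem.Str.len (pyAt values box1) = 2 then
        let pair1 := pyAt values box1
        ftOuter values rest (ftInner values pair1 rest twins)
      else ftOuter values rest twins

def find_twins (values : List (String × String)) (unit : List String) : List String :=
  ftOuter values unit []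

-- ===== PORT B =====
-- first pass: total[v] = total.get(v, 0) + 1
def ftTotal (values : List (String × String)) (unit : List String) : PySem.Dict String Int :=
  unit.foldl (fun d box => d.insert (pyAt values box) (d.getD (pyAt values box) 0 + 1))
    PySem.Dict.empty

-- loop body of the second pass, on v = values[box]; state = (seen, twins);
-- total[v] ported as getD (v is always a key of total, so getD 0 is exact)
def ftStepV (total : PySem.Dict String Int)
    (st : PySem.Dict String Int × List String) (v : String) :
    PySem.Dict String Int × List String :=
  let c := st.1.getD v 0 + 1
  let seen := st.1.insert v c
  if PySem.Str.len v = 2 then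
    (seen, st.2 ++ List.replicate (total.getD v 0 - c).toNat v)
  else (seen, st.2)

def find_twins_alt (values : List (String × String)) (unit : List String) : List String :=
  (unit.foldl (fun st box => ftStepV (ftTotal values unit) st (pyAt values box))
    (PySem.Dict.empty, [])).2

-- ===== PRECONDITION & SPEC =====
-- Pre_ excludes exactly the inputs where some box of unit is not a key of values: there the Python A
-- (and the Python B) raise KeyError.
def Pre_find_twins (values : List (String × String)) (unit : List String) : Prop :=
  ∀ b ∈ unit, (PySem.Dict.ofList values).contains b = true
instance (values : List (String × String)) (unit : List String) : Decidable (Pre_find_twins values unit) := by unfold Pre_find_twins; infer_instance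

def pvWitness_find_twins : (List (String × String)) × List String :=
  ([("a1", "23"), ("a2", "23"), ("a3", "145")], ["a1", "a2", "a3"])

def Spec_find_twins (values : List (String × String)) (unit : List String) (out : List String) : Prop := out = find_twins_alt values unit
instance (values : List (String × String)) (unit : List String) (out : List String) : Decidable (Spec_find_twins values unit out) := by unfold Spec_find_twins; infer_instance

-- ===== CLAIM (what is proved, stated in full; the proofs are below) =====
def Claim_equal_find_twins : Prop := ∀ (values : List (String × String)) (unit : List String), Dom_find_twins values unit → Pre_find_twins values unit → Spec_find_twins values unit (find_twins values unit)

-- ===== LEMMAS AND PROOFS =====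

-- common characterisation: per box with a 2-candidate value, one copy per later equal value
def twinSpec : List String → List String
  | [] => []
  | v :: m => (if PySem.Str.len v = 2 then List.replicate (m.count v) v else []) ++ twinSpec m

theorem ftInner_eq (values : List (String × String)) (p : String) :
    ∀ (rest tw : List String),
      ftInner values p rest tw = tw ++ List.replicate ((rest.map (pyAt values)).count p) p := by
  intro rest
  induction rest with
  | nil => intro tw; simp [ftInner]
  | cons b rs ih =>
      intro tw
      simp only [ftInner, List.map_cons]
      by_cases h : pyAt values b = p
      · rw [if_pos h, ih, h, List.count_cons_self, List.replicate_succ, List.append_assoc]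
        rfl
      · rw [if_neg h, ih, List.count_cons_of_ne (by simpa using h)]

theorem ftOuter_eq (values : List (String × String)) :
    ∀ (boxes tw : List String),
      ftOuter values boxes tw = tw ++ twinSpec (boxes.map (pyAt values)) := by
  intro boxes
  induction boxes with
  | nil => intro tw; simp [ftOuter, twinSpec]
  | cons b rs ih =>
      intro tw
      simp only [ftOuter, List.map_cons, twinSpec]
      by_cases h : PySem.Str.len (pyAt values b) = 2
      · rw [if_pos h, if_pos h, ih, ftInner_eq, List.append_assoc]
      · rw [if_neg h, if_neg h, ih]
        simp

theorem ftTotal_getD (values : List (String × String)) (unit : List String) (v : String) :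
    (ftTotal values unit).getD v 0 = ((unit.map (pyAt values)).count v : Int) := by
  unfold ftTotal
  have h1 : List.foldl (fun (d : PySem.Dict String Int) box =>
        d.insert (pyAt values box) (d.getD (pyAt values box) 0 + 1)) PySem.Dict.empty unit
      = List.foldl (fun (d : PySem.Dict String Int) x => d.insert x (d.getD x 0 + 1))
          PySem.Dict.empty (unit.map (pyAt values)) :=
    (List.foldl_map (f := pyAt values)
      (g := fun (d : PySem.Dict String Int) x => d.insert x (d.getD x 0 + 1))
      (l := unit) (init := PySem.Dict.empty)).symm
  rw [h1, PySem.Dict.getD_foldl_insert_add_one]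
  simp

theorem ftFold_eq (total : PySem.Dict String Int) (M : List String)
    (htot : ∀ v, total.getD v 0 = (M.count v : Int)) :
    ∀ (m pre : List String) (d : PySem.Dict String Int) (tw : List String),
      M = pre ++ m →
      (∀ v, d.getD v 0 = (pre.count v : Int)) →
      (m.foldl (ftStepV total) (d, tw)).2 = tw ++ twinSpec m := by
  intro m
  induction m with
  | nil => intro pre d tw _ _; simp [twinSpec]
  | cons v m' ih =>
      intro pre d tw hM hd
      have hc : (total.getD v 0 - (d.getD v 0 + 1)).toNat = m'.count v := by
        rw [htot v, hd v, hM]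
        simp [List.count_append, List.count_cons_self]
      have hd' : ∀ w, (d.insert v (d.getD v 0 + 1)).getD w 0 = (((pre ++ [v]).count w : Nat) : Int) := by
        intro w
        rw [PySem.Dict.getD_insert]
        by_cases hw : w = v
        · subst hw; simp [List.count_append, hd w]
        · have hw' : ¬ v = w := fun h => hw h.symm
          simp [hw, hw', hd w, List.count_append]
      have hM' : M = (pre ++ [v]) ++ m' := by rw [hM]; simp
      simp only [List.foldl_cons, twinSpec]
      by_cases h : PySem.Str.len v = 2
      · rw [if_pos h]
        have := ih (pre ++ [v]) (d.insert v (d.getD v 0 + 1))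
          (tw ++ List.replicate (total.getD v 0 - (d.getD v 0 + 1)).toNat v) hM' hd'
        simp only [ftStepV, if_pos h]
        rw [this, hc, List.append_assoc]
      · rw [if_neg h]
        have := ih (pre ++ [v]) (d.insert v (d.getD v 0 + 1)) tw hM' hd'
        simp only [ftStepV, if_neg h]
        rw [this]
        simp

-- ===== VERDICT (by name: the statement is the Claim_ definition above) =====
theorem find_twins_spec : Claim_equal_find_twins := by
  intro values unit _ _
  unfold Spec_find_twins find_twins find_twins_alt
  rw [ftOuter_eq]
  have h2 : List.foldl (fun st box => ftStepV (ftTotal values unit) st (pyAt values box))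
        ((PySem.Dict.empty : PySem.Dict String Int), ([] : List String)) unit
      = List.foldl (ftStepV (ftTotal values unit))
          ((PySem.Dict.empty : PySem.Dict String Int), ([] : List String))
          (unit.map (pyAt values)) :=
    (List.foldl_map (f := pyAt values) (g := ftStepV (ftTotal values unit))
      (l := unit) (init := ((PySem.Dict.empty : PySem.Dict String Int), ([] : List String)))).symm
  rw [h2, ftFold_eq (ftTotal values unit) (unit.map (pyAt values))
      (ftTotal_getD values unit) (unit.map (pyAt values)) [] PySem.Dict.empty []
      rfl (by intro v; simp)]
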